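-- pv_equiv track=rewrite | github.com/Bobowski/stario | src/stario/telemetry/rich.py | _group_attributes
-- ===== SOURCE A (Python) =====
-- from collections.abc import Mapping
-- from typing import Any
--
-- def _group_attributes(attrs: Mapping[str, Any]) -> list[tuple[str, str, bool]]:
--     """Group dotted keys by prefix for compact output."""
--     if not attrs:
--         return []
--
--     # Group by prefix (all but last dot segment)
--     grouped: dict[str, list[tuple[str, str]]] = {}  # prefix -> [(suffix, value), ...]
--     flat: list[tuple[str, str]] = []  # [(key, value), ...] for keys without dots
--
--     for key, value in attrs.items():
--         parts = key.rsplit(".", 1)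
--         if len(parts) == 2:
--             prefix, suffix = parts
--             grouped.setdefault(prefix, []).append((suffix, str(value)))
--         else:
--             flat.append((key, str(value)))
--
--     # Build result: prefixes sorted, then flat keys sorted
--     result: list[tuple[str, str, bool]] = []
--
--     for prefix in sorted(grouped.keys()):
--         # Header for the prefix
--         result.append((prefix, "", True))
--         # Values sorted by suffix
--         for suffix, value in sorted(grouped[prefix]):
--             result.append((f".{suffix}", value, False))
--
--     # Flat keys (no dots) - sorted, not indented
--     for key, value in sorted(flat):
--         result.append((key, value, False))
--
--     return result
-- ===== SOURCE B (Python) =====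
-- def _group_attributes(attrs):
--     """Group dotted keys by prefix for compact output.
--
--     One flat pass splits the items; one global lexicographic sort orders all
--     dotted (prefix, suffix, value) triples; a single run-length scan emits a
--     header whenever the prefix changes, so no dict of per-prefix lists is
--     ever built and no per-group sorts are needed.
--     """
--     dotted = []
--     flat = []
--     for key, value in attrs.items():
--         parts = key.rsplit(".", 1)
--         if len(parts) == 2:
--             dotted.append((parts[0], parts[1], str(value)))
--         else:
--             flat.append((key, str(value)))
--     dotted.sort()
--     result = []
--     prev = None
--     for prefix, suffix, value in dotted:
--         if prev != prefix:
--             result.append((prefix, "", True))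
--             prev = prefix
--         result.append((f".{suffix}", value, False))
--     for key, value in sorted(flat):
--         result.append((key, value, False))
--     return result
-- ===== Notes on version B (the rewrite author's own statement) =====
-- stated objective: alternative
-- what changed: Replaces A's dict of per-prefix lists with its sorted-keys walk and a separate sort per group by one global lexicographic sort of (prefix, suffix, value) triples followed by a single run-length scan that emits a header whenever the prefix changes.
import Mathlib
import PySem

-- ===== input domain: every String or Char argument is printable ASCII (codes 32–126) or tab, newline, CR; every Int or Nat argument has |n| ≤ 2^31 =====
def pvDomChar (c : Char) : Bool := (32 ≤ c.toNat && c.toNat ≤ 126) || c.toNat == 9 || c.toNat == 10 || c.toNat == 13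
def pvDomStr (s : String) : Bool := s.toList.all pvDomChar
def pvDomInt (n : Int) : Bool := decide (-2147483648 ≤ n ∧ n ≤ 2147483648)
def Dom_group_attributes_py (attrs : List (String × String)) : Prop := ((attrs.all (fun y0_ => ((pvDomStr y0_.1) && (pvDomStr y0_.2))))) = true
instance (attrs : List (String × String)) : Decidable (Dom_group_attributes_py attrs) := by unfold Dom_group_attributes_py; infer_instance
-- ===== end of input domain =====

-- B replaces A's dict-of-groups + per-group sorts by one global lexicographic sort and a
-- run-length scan (objective: alternative, same asymptotic cost). Equivalence proved on
-- association lists with pairwise-distinct keys (the faithful encodings of a Python Mapping).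

-- ===== PORT A =====
-- exact hand port of key.rsplit(".", 1) (PySem has no rsplit): the two-part case splits at the LAST '.'
def pvRsplitChars : List Char → Option (List Char × List Char)
  | [] => none
  | c :: rest =>
    match pvRsplitChars rest with
    | some ps => some (c :: ps.1, ps.2)
    | none => if c = '.' then some ([], rest) else none

def pvRsplit1 (k : String) : Option (String × String) :=
  match pvRsplitChars k.toList with
  | some ps => some (String.ofList ps.1, String.ofList ps.2)
  | none => none

-- Python compares tuples of strings lexicographically; toLex is exactly that order
def pvPairKey (sv : String × String) : String ×ₗ String := toLex (sv.1, sv.2)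
def pvTripleKey (t : String × String × String) : String ×ₗ (String ×ₗ String) :=
  toLex (t.1, toLex (t.2.1, t.2.2))

def group_attributes_py (attrs : List (String × String)) : List (String × String × Bool) :=
  if attrs = [] then []
  else
    -- grouped.setdefault(prefix, []).append((suffix, str(value))) is d.modify prefix [] (· ++ [(suffix, value)])
    let st := attrs.foldl
      (fun (st : PySem.Dict String (List (String × String)) × List (String × String)) kv =>
        match pvRsplit1 kv.1 with
        | some ps => (st.1.modify ps.1 [] (fun l => l ++ [(ps.2, kv.2)]), st.2)
        | none => (st.1, st.2 ++ [(kv.1, kv.2)])) (PySem.Dict.empty, [])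
    let result := (PySem.List.sorted st.1.keys (fun k => k) false).foldl (fun acc p =>
        (PySem.List.sorted (st.1.getD p []) pvPairKey false).foldl
          (fun acc2 sv => acc2 ++ [("." ++ sv.1, sv.2, false)]) (acc ++ [(p, "", true)])) []
    (PySem.List.sorted st.2 pvPairKey false).foldl
      (fun acc kv => acc ++ [(kv.1, kv.2, false)]) result

-- ===== PORT B =====
-- loop body of B's run-length scan: state is (result, prev)
def pvEmitStep (st2 : List (String × String × Bool) × Option String)
    (t : String × String × String) : List (String × String × Bool) × Option String :=
  let st3 := if st2.2 = some t.1 then st2 else (st2.1 ++ [(t.1, "", true)], some t.1)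
  (st3.1 ++ [("." ++ t.2.1, t.2.2, false)], st3.2)

def group_attributes_py_alt (attrs : List (String × String)) : List (String × String × Bool) :=
  let st := attrs.foldl
    (fun (st : List (String × String × String) × List (String × String)) kv =>
      match pvRsplit1 kv.1 with
      | some ps => (st.1 ++ [(ps.1, ps.2, kv.2)], st.2)
      | none => (st.1, st.2 ++ [(kv.1, kv.2)])) ([], [])
  let dotted := PySem.List.sorted st.1 pvTripleKey false
  let em := dotted.foldl pvEmitStep ([], none)
  (PySem.List.sorted st.2 pvPairKey false).foldl
    (fun acc kv => acc ++ [(kv.1, kv.2, false)]) em.1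

-- ===== PRECONDITION & SPEC =====
-- Pre_ excludes association lists with duplicate keys: they do not represent a Python Mapping
-- (building the dict collapses them), so the ports' behaviour there encodes no Python behaviour.
def Pre_group_attributes_py (attrs : List (String × String)) : Prop :=
  (attrs.map Prod.fst).Nodup
instance (attrs : List (String × String)) : Decidable (Pre_group_attributes_py attrs) := by
  unfold Pre_group_attributes_py; infer_instance

def pvWitness_group_attributes_py : (List (String × String)) :=
  [("a.x", "1"), ("a.y", "2"), ("b", "3")]

def Spec_group_attributes_py (attrs : List (String × String)) (out : List (String × String × Bool)) : Prop := out = group_attributes_py_alt attrs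
instance (attrs : List (String × String)) (out : List (String × String × Bool)) : Decidable (Spec_group_attributes_py attrs out) := by unfold Spec_group_attributes_py; infer_instance

-- ===== CLAIM (what is proved, stated in full; the proofs are below) =====
def Claim_equal_group_attributes_py : Prop := ∀ (attrs : List (String × String)), Dom_group_attributes_py attrs → Pre_group_attributes_py attrs → Spec_group_attributes_py attrs (group_attributes_py attrs)

-- ===== LEMMAS AND PROOFS =====

-- canonical decompositions of the input, used by both directions of the proof
def pvDotted (attrs : List (String × String)) : List (String × String × String) :=
  attrs.filterMap (fun kv => match pvRsplit1 kv.1 with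
    | some ps => some (ps.1, ps.2, kv.2)
    | none => none)

def pvFlat (attrs : List (String × String)) : List (String × String) :=
  attrs.filterMap (fun kv => match pvRsplit1 kv.1 with
    | some _ => none
    | none => some (kv.1, kv.2))

def pvGroup (attrs : List (String × String)) (p : String) : List (String × String) :=
  ((pvDotted attrs).filter (fun t => t.1 == p)).map (fun t => t.2)

def pvPs (attrs : List (String × String)) : List String :=
  PySem.List.sorted (PySem.Set.ofList ((pvDotted attrs).map (fun t => t.1))) (fun k => k) false

def pvBlock (attrs : List (String × String)) (p : String) : List (String × String × String) :=
  (PySem.List.sorted (pvGroup attrs p) pvPairKey false).map (fun sv => (p, sv.1, sv.2))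

def pvRowsOf (l : List (String × String × String)) : List (String × String × Bool) :=
  l.map (fun t => ("." ++ t.2.1, t.2.2, false))

def pvG (attrs : List (String × String)) : List (String × String × Bool) :=
  (pvPs attrs).flatMap (fun p => (p, "", true) :: pvRowsOf (pvBlock attrs p))

def pvC (attrs : List (String × String)) : List (String × String × String) :=
  (pvPs attrs).flatMap (fun p => pvBlock attrs p)

lemma pvRsplitChars_eq (cs : List Char) (a b : List Char)
    (h : pvRsplitChars cs = some (a, b)) : cs = a ++ '.' :: b := by
  induction cs generalizing a b with
  | nil => simp [pvRsplitChars] at h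
  | cons c rest ih =>
    rw [pvRsplitChars] at h
    cases hr : pvRsplitChars rest with
    | some ps =>
      rw [hr] at h
      simp only [Option.some.injEq, Prod.mk.injEq] at h
      obtain ⟨rfl, rfl⟩ := h
      simp [ih ps.1 ps.2 (by rw [hr])]
    | none =>
      rw [hr] at h
      by_cases hc : c = '.'
      · subst hc
        simp at h
        obtain ⟨rfl, rfl⟩ := h
        simp
      · simp [hc] at h


lemma pvRsplit1_eq (k p s : String) (h : pvRsplit1 k = some (p, s)) :
    k.toList = p.toList ++ '.' :: s.toList := by
  rw [pvRsplit1] at h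
  cases hr : pvRsplitChars k.toList with
  | none => rw [hr] at h; exact absurd h (by simp)
  | some ps =>
    rw [hr] at h
    simp only [Option.some.injEq, Prod.mk.injEq] at h
    obtain ⟨hp, hs⟩ := h
    have := pvRsplitChars_eq k.toList ps.1 ps.2 (by rw [hr])
    rw [this, ← hp, ← hs, String.toList_ofList, String.toList_ofList]


lemma pvRsplit1_inj (k k' p s : String) (h : pvRsplit1 k = some (p, s))
    (h' : pvRsplit1 k' = some (p, s)) : k = k' := by
  have e1 := pvRsplit1_eq k p s h
  have e2 := pvRsplit1_eq k' p s h'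
  exact String.toList_inj.mp (e1.trans e2.symm)


lemma pvFoldA (attrs : List (String × String)) :
    ∀ (d : PySem.Dict String (List (String × String))) (f : List (String × String)),
    attrs.foldl
      (fun (st : PySem.Dict String (List (String × String)) × List (String × String)) kv =>
        match pvRsplit1 kv.1 with
        | some ps => (st.1.modify ps.1 [] (fun l => l ++ [(ps.2, kv.2)]), st.2)
        | none => (st.1, st.2 ++ [(kv.1, kv.2)])) (d, f)
      = ((pvDotted attrs).foldl (fun d t => d.modify t.1 [] (fun l => l ++ [t.2])) d,
         f ++ pvFlat attrs) := by
  induction attrs with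
  | nil => intro d f; simp [pvDotted, pvFlat]
  | cons kv rest ih =>
    intro d f
    simp only [List.foldl_cons]
    cases hr : pvRsplit1 kv.1 with
    | some ps =>
      rw [ih]
      simp [pvDotted, pvFlat, hr]
    | none =>
      rw [ih]
      simp [pvDotted, pvFlat, hr]


lemma pvFoldB (attrs : List (String × String)) :
    ∀ (l : List (String × String × String)) (f : List (String × String)),
    attrs.foldl
      (fun (st : List (String × String × String) × List (String × String)) kv =>
        match pvRsplit1 kv.1 with
        | some ps => (st.1 ++ [(ps.1, ps.2, kv.2)], st.2)
        | none => (st.1, st.2 ++ [(kv.1, kv.2)])) (l, f)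
      = (l ++ pvDotted attrs, f ++ pvFlat attrs) := by
  induction attrs with
  | nil => intro l f; simp [pvDotted, pvFlat]
  | cons kv rest ih =>
    intro l f
    simp only [List.foldl_cons]
    cases hr : pvRsplit1 kv.1 with
    | some ps =>
      rw [ih]
      simp [pvDotted, pvFlat, hr]
    | none =>
      rw [ih]
      simp [pvDotted, pvFlat, hr]


lemma pvKeysD (attrs : List (String × String)) :
    ((pvDotted attrs).foldl (fun d t => d.modify t.1 [] (fun l => l ++ [t.2]))
      (PySem.Dict.empty : PySem.Dict String (List (String × String)))).keys
    = PySem.Set.ofList ((pvDotted attrs).map (fun t => t.1)) := by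
  rw [PySem.Dict.keys_foldl_modify_key (pvDotted attrs) (fun t => t.1) []
    (fun _ t => fun l => l ++ [t.2])]
  simp [PySem.Dict.keys_empty, PySem.Set.update_nil_left]


lemma pvGetD (attrs : List (String × String)) (p : String) :
    ((pvDotted attrs).foldl (fun d t => d.modify t.1 [] (fun l => l ++ [t.2]))
      (PySem.Dict.empty : PySem.Dict String (List (String × String)))).getD p []
    = pvGroup attrs p := by
  rw [PySem.Dict.getD_foldl_modify_append]
  simp [PySem.Dict.getD_empty, pvGroup]


lemma pvMemDotted (attrs : List (String × String)) (t : String × String × String)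
    (h : t ∈ pvDotted attrs) : ∃ kv ∈ attrs, pvRsplit1 kv.1 = some (t.1, t.2.1) := by
  simp only [pvDotted, List.mem_filterMap] at h
  obtain ⟨kv, hkv, heq⟩ := h
  cases hr : pvRsplit1 kv.1 with
  | none => rw [hr] at heq; exact absurd heq (by simp)
  | some ps =>
    rw [hr] at heq
    simp only [Option.some.injEq] at heq
    refine ⟨kv, hkv, ?_⟩
    rw [hr, ← heq]


lemma pvNodupPS (attrs : List (String × String)) (h : (attrs.map Prod.fst).Nodup) :
    ((pvDotted attrs).map (fun t => (t.1, t.2.1))).Nodup := by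
  induction attrs with
  | nil => simp [pvDotted]
  | cons kv rest ih =>
    simp only [List.map_cons, List.nodup_cons] at h
    obtain ⟨h1, h2⟩ := h
    cases hr : pvRsplit1 kv.1 with
    | none => simpa [pvDotted, List.filterMap_cons, hr] using ih h2
    | some ps =>
      simp only [pvDotted, List.filterMap_cons, hr, List.map_cons, List.nodup_cons]
      refine ⟨?_, ih h2⟩
      intro hm
      simp only [List.mem_map] at hm
      obtain ⟨t, ht, hteq⟩ := hm
      obtain ⟨kv', hkv', hr'⟩ := pvMemDotted rest t ht
      have : kv'.1 = kv.1 := by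
        apply pvRsplit1_inj kv'.1 kv.1 ps.1 ps.2 _ hr
        injection hteq with e1 e2
        rw [hr', e1, e2]
      exact h1 (this ▸ List.mem_map.mpr ⟨kv', hkv', rfl⟩)


lemma pvGroupSuffixNodup (attrs : List (String × String)) (h : (attrs.map Prod.fst).Nodup)
    (p : String) : ((pvGroup attrs p).map (fun sv => sv.1)).Nodup := by
  have hd := pvNodupPS attrs h
  have hsub : (((pvDotted attrs).filter (fun t => t.1 == p)).map (fun t => (t.1, t.2.1))).Nodup :=
    hd.sublist (List.Sublist.map _ List.filter_sublist)
  simp only [pvGroup, List.map_map, List.Nodup, List.pairwise_map] at hsub ⊢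
  refine hsub.imp_of_mem ?_
  intro a b ha hb hne
  have hap : a.1 = p := by simpa using (List.mem_filter.mp ha).2
  have hbp : b.1 = p := by simpa using (List.mem_filter.mp hb).2
  intro hsnd
  have hs : a.2.1 = b.2.1 := by simpa [Function.comp] using hsnd
  exact hne (by simp [hap, hbp, hs])


lemma pvBlockPairwise (attrs : List (String × String)) (h : (attrs.map Prod.fst).Nodup)
    (p : String) :
    (pvBlock attrs p).Pairwise (fun a b => pvTripleKey a < pvTripleKey b) := by
  simp only [pvBlock, List.pairwise_map]
  have h1 := PySem.List.sorted_pairwise (pvGroup attrs p) pvPairKey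
  have hnd : ((PySem.List.sorted (pvGroup attrs p) pvPairKey false).map (fun sv => sv.1)).Nodup := by
    have hperm := (PySem.List.sorted_perm (pvGroup attrs p) pvPairKey false).map (fun sv => sv.1)
    exact hperm.nodup_iff.mpr (pvGroupSuffixNodup attrs h p)
  have h2 : (PySem.List.sorted (pvGroup attrs p) pvPairKey false).Pairwise
      (fun a b => a.1 ≠ b.1) := by
    simpa [List.Nodup, List.pairwise_map] using hnd
  refine (h1.and h2).imp ?_
  intro a b hab
  obtain ⟨hle, hne⟩ := hab
  simp only [pvPairKey, Prod.Lex.le_iff, ofLex_toLex] at hle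
  simp only [pvTripleKey, Prod.Lex.lt_iff, ofLex_toLex]
  rcases hle with hlt | ⟨heq, _⟩
  · exact Or.inr ⟨by simp, Or.inl hlt⟩
  · exact absurd heq hne


lemma pvCountFlatMapFilter (l : List (String × String × String)) (a : String × String × String) :
    ∀ (ps : List String), ps.Nodup →
    (ps.flatMap (fun p => l.filter (fun t => t.1 == p))).count a
      = if a.1 ∈ ps then l.count a else 0 := by
  intro ps
  induction ps with
  | nil => simp
  | cons p ps ih =>
    intro hnd
    simp only [List.nodup_cons] at hnd
    obtain ⟨hp, hnd'⟩ := hnd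
    rw [List.flatMap_cons, List.count_append, ih hnd']
    by_cases hap : a.1 = p
    · have h1 : (l.filter (fun t => t.1 == p)).count a = l.count a :=
        List.count_filter (by simp [hap])
      have h2 : a.1 ∉ ps := hap ▸ hp
      rw [h1, if_neg h2, if_pos (by simp [hap]), Nat.add_zero]
    · have h1 : (l.filter (fun t => t.1 == p)).count a = 0 := by
        rw [List.count_eq_zero]
        intro hmem
        exact hap (by simpa using (List.mem_filter.mp hmem).2)
      simp [h1, hap, List.mem_cons]


lemma pvFlatMapFilterPerm (ps : List String) (l : List (String × String × String))
    (hnd : ps.Nodup) (hmem : ∀ t ∈ l, t.1 ∈ ps) :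
    (ps.flatMap (fun p => l.filter (fun t => t.1 == p))).Perm l := by
  rw [List.perm_iff_count]
  intro a
  rw [pvCountFlatMapFilter l a ps hnd]
  by_cases ha : a ∈ l
  · simp [hmem a ha]
  · rw [List.count_eq_zero.mpr ha]
    simp


lemma pvFlatMapPermCongr {α β : Type} (ps : List α) (f g : α → List β)
    (h : ∀ p ∈ ps, (f p).Perm (g p)) : (ps.flatMap f).Perm (ps.flatMap g) := by
  induction ps with
  | nil => simp
  | cons p ps ih =>
    simp only [List.flatMap_cons]
    exact (h p (by simp)).append (ih (fun q hq => h q (by simp [hq])))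


lemma pvBlockPerm (attrs : List (String × String)) (p : String) :
    (pvBlock attrs p).Perm ((pvDotted attrs).filter (fun t => t.1 == p)) := by
  have h1 : (pvBlock attrs p).Perm ((pvGroup attrs p).map (fun sv => (p, sv.1, sv.2))) :=
    (PySem.List.sorted_perm (pvGroup attrs p) pvPairKey false).map _
  have h2 : (pvGroup attrs p).map (fun sv => (p, sv.1, sv.2))
      = (pvDotted attrs).filter (fun t => t.1 == p) := by
    simp only [pvGroup, List.map_map]
    rw [show ((fun sv => (p, sv.1, sv.2)) ∘ (fun (t : String × String × String) => t.2))
        = fun t => (p, t.2.1, t.2.2) from rfl]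
    conv_rhs => rw [← List.map_id ((pvDotted attrs).filter (fun t => t.1 == p))]
    refine List.map_congr_left ?_
    intro t ht
    have : t.1 = p := by simpa using (List.mem_filter.mp ht).2
    simp [← this]
  exact h2 ▸ h1


lemma pvPsNodup (attrs : List (String × String)) : (pvPs attrs).Nodup := by
  exact (PySem.List.sorted_perm _ _ _).nodup_iff.mpr (PySem.Set.nodup_ofList _)


lemma pvMemPs (attrs : List (String × String)) (p : String) :
    p ∈ pvPs attrs ↔ ∃ t ∈ pvDotted attrs, t.1 = p := by
  simp [pvPs, PySem.List.mem_sorted, PySem.Set.mem_ofList, List.mem_map, eq_comm]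


lemma pvCPerm (attrs : List (String × String)) : (pvC attrs).Perm (pvDotted attrs) := by
  refine (pvFlatMapPermCongr (pvPs attrs) _ _ (fun p _ => pvBlockPerm attrs p)).trans ?_
  refine pvFlatMapFilterPerm _ _ (pvPsNodup attrs) ?_
  intro t ht
  exact (pvMemPs attrs t.1).mpr ⟨t, ht, rfl⟩


lemma pvPairwiseFlatMapBlocks (ps : List String) (B : String → List (String × String × String))
    (h1 : ps.Pairwise (· < ·))
    (h2 : ∀ p ∈ ps, ∀ t ∈ B p, t.1 = p)
    (h3 : ∀ p ∈ ps, (B p).Pairwise (fun a b => pvTripleKey a < pvTripleKey b)) :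
    (ps.flatMap B).Pairwise (fun a b => pvTripleKey a < pvTripleKey b) := by
  induction ps with
  | nil => simp
  | cons p ps ih =>
    simp only [List.pairwise_cons] at h1
    obtain ⟨hlt, h1'⟩ := h1
    simp only [List.flatMap_cons]
    rw [List.pairwise_append]
    refine ⟨h3 p (by simp), ih h1' (fun q hq => h2 q (by simp [hq]))
      (fun q hq => h3 q (by simp [hq])), ?_⟩
    intro t ht u hu
    obtain ⟨q, hq, huq⟩ := List.mem_flatMap.mp hu
    have htp : t.1 = p := h2 p (by simp) t ht
    have huq1 : u.1 = q := h2 q (by simp [hq]) u huq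
    simp only [pvTripleKey, Prod.Lex.lt_iff, ofLex_toLex]
    exact Or.inl (by rw [htp, huq1]; exact hlt q hq)


lemma pvSortedC (attrs : List (String × String)) (h : (attrs.map Prod.fst).Nodup) :
    PySem.List.sorted (pvDotted attrs) pvTripleKey false = pvC attrs := by
  refine PySem.List.sorted_eq_of_perm_of_pairwise_lt _ _ _ (pvCPerm attrs) ?_
  refine pvPairwiseFlatMapBlocks (pvPs attrs) (pvBlock attrs)
    (PySem.List.sorted_ofList_pairwise_lt _) ?_ (fun p _ => pvBlockPairwise attrs h p)
  intro p _ t ht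
  simp only [pvBlock, List.mem_map] at ht
  obtain ⟨sv, _, hsv⟩ := ht
  rw [← hsv]


lemma pvEmitRows (l : List (String × String × String)) :
    ∀ (acc : List (String × String × Bool)) (p : String), (∀ t ∈ l, t.1 = p) →
    l.foldl pvEmitStep (acc, some p) = (acc ++ pvRowsOf l, some p) := by
  induction l with
  | nil => intro acc p _; simp [pvRowsOf]
  | cons t rest ih =>
    intro acc p hl
    have ht : t.1 = p := hl t (by simp)
    simp only [List.foldl_cons]
    have hstep : pvEmitStep (acc, some p) t
        = (acc ++ [("." ++ t.2.1, t.2.2, false)], some p) := by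
      simp [pvEmitStep, ht]
    rw [hstep, ih (acc ++ [("." ++ t.2.1, t.2.2, false)]) p (fun u hu => hl u (by simp [hu]))]
    simp [pvRowsOf]


lemma pvEmitBlocks (ps : List String) (B : String → List (String × String × String)) :
    ∀ (acc : List (String × String × Bool)) (prev : Option String),
    ps.Nodup → (∀ p ∈ ps, prev ≠ some p) → (∀ p ∈ ps, B p ≠ [] ∧ ∀ t ∈ B p, t.1 = p) →
    (ps.flatMap B).foldl pvEmitStep (acc, prev)
      = (acc ++ ps.flatMap (fun p => (p, "", true) :: pvRowsOf (B p)),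
         ps.foldl (fun _ p => some p) prev) := by
  induction ps with
  | nil => intro acc prev _ _ _; simp
  | cons p ps' ih =>
    intro acc prev hnd hprev hB
    simp only [List.nodup_cons] at hnd
    obtain ⟨hpnotin, hnd'⟩ := hnd
    obtain ⟨hBne, hBc⟩ := hB p (by simp)
    cases hBp : B p with
    | nil => exact absurd hBp hBne
    | cons t rest =>
      have ht : t.1 = p := hBc t (by rw [hBp]; simp)
      simp only [List.flatMap_cons, List.foldl_append, hBp, List.foldl_cons]
      have hstep : pvEmitStep (acc, prev) t
          = (acc ++ [(t.1, "", true)] ++ [("." ++ t.2.1, t.2.2, false)], some t.1) := by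
        have : prev ≠ some t.1 := by rw [ht]; exact hprev p (by simp)
        simp [pvEmitStep, this]
      rw [hstep, ht,
        pvEmitRows rest _ p (fun u hu => hBc u (by rw [hBp]; simp [hu])),
        ih _ (some p) hnd' (by intro q hq hc; injection hc with hc'; exact hpnotin (hc' ▸ hq))
          (fun q hq => hB q (by simp [hq]))]
      simp [pvRowsOf, List.append_assoc]


lemma pvEmitted (attrs : List (String × String)) :
    ((pvC attrs).foldl pvEmitStep ([], none)).1 = pvG attrs := by
  rw [pvC, pvEmitBlocks (pvPs attrs) (pvBlock attrs) [] none (pvPsNodup attrs)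
    (fun p _ => by simp) ?_]
  · simp [pvG]
  · intro p hp
    constructor
    · obtain ⟨t, ht, htp⟩ := (pvMemPs attrs p).mp hp
      simp only [pvBlock, ne_eq, List.map_eq_nil_iff, PySem.List.sorted_eq_nil_iff]
      intro hg
      have : t ∈ (pvDotted attrs).filter (fun u => u.1 == p) :=
        List.mem_filter.mpr ⟨ht, by simp [htp]⟩
      rw [pvGroup, List.map_eq_nil_iff] at hg
      rw [hg] at this
      simp at this
    · intro t ht
      simp only [pvBlock, List.mem_map] at ht
      obtain ⟨sv, _, hsv⟩ := ht
      rw [← hsv]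


-- ===== VERDICT (by name: the statement is the Claim_ definition above) =====
theorem group_attributes_py_spec : Claim_equal_group_attributes_py := by
  unfold Claim_equal_group_attributes_py
  intro attrs _ hpre
  unfold Spec_group_attributes_py
  by_cases he : attrs = []
  · subst he; rfl
  · rw [group_attributes_py, group_attributes_py_alt, if_neg he]
    simp only [pvFoldA attrs PySem.Dict.empty [], pvFoldB attrs [] [], List.nil_append]
    rw [pvKeysD]
    simp only [pvGetD]
    simp only [PySem.List.foldl_append_singleton_eq_map]
    simp only [List.append_assoc]
    rw [PySem.List.foldl_append_eq_flatMap]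
    rw [pvSortedC attrs hpre, pvEmitted]
    simp [pvG, pvRowsOf, pvBlock, List.map_map, Function.comp_def, pvPs]
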